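-- pv_equiv track=rewrite | github.com/Stannislav/daily_programmer | DP_366_1 - Word funnel 1/dp_366_1.py | funnel
-- ===== SOURCE A (Python) =====
-- def funnel(word1, word2):
--     '''
--     Test if  word2 can be obtained by removing one letter from word1.
--
--     Here we will not make use of the tree structure introduced below,
--     but just compare both words letter by letter.
--     '''
--     if len(word2) != len(word1) - 1:
--         return False
--
--     removed = 0
--     for i in range(len(word2)):
--         if word1[i+removed] != word2[i]:
--             if removed:
--                 return False
--             else:
--                 removed = 1
--
--     return True
-- ===== SOURCE B (Python) =====
-- def funnel(word1, word2):
--     """Test if word2 can be obtained by removing one letter from word1.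
--
--     Different algorithm: instead of a single carry-flag scan, try every
--     removal position explicitly.
--     """
--     if len(word2) != len(word1) - 1:
--         return False
--     return any(word1[:i] + word1[i + 1:] == word2 for i in range(len(word1)))
-- ===== Notes on version B (the rewrite author's own statement) =====
-- stated objective: alternative
-- what changed: Replaces A's single-pass carry-flag index loop by the direct definition: test every removal position i and check word1[:i]+word1[i+1:] == word2; this also fixes A's missed re-comparison after the first mismatch.
-- intended difference: On inputs with len(word2)==len(word1)-1 whose first mismatch at index i has word1[i+1] != word2[i] but word1[i+2:] == word2[i+1:] (e.g. ('ab','x')), A returns True because after setting the removed flag it never re-compares word2[i] against word1[i+1], while B returns False, the intended answer since word2 is not word1 minus one letter. — e.g. on funnel("ab", "x"): A returns true, B returns false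
import Mathlib
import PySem

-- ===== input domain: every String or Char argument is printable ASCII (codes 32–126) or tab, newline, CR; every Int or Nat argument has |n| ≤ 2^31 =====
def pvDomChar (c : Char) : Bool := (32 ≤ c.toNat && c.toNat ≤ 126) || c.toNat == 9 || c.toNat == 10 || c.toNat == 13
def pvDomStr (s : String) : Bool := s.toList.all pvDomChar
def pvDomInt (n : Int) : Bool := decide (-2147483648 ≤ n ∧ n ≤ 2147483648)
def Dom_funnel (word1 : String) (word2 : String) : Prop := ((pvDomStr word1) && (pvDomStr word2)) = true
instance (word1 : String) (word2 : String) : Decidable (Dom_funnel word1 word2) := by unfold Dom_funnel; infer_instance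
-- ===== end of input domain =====

-- B replaces A's carry-flag scan by testing every removal position; not faster (O(n^2) vs A's O(n)),
-- but a genuinely different algorithm, and it fixes A's missed re-comparison after the first mismatch (see D_funnel).

-- ===== PORT A =====
-- the for-loop over range(len(word2)) with the mutable 'removed' flag, as structural recursion on the index list
def funnelLoop (l1 l2 : List Char) : List Nat → Nat → Bool
  | [], _ => true
  | i :: rest, removed =>
    if PySem.List.pyGet? l1 ((i : Int) + (removed : Int)) ≠ PySem.List.pyGet? l2 (i : Int) then
      if removed ≠ 0 then false else funnelLoop l1 l2 rest 1
    else funnelLoop l1 l2 rest removed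

def funnel (word1 : String) (word2 : String) : Bool :=
  if (word2.toList.length : Int) ≠ (word1.toList.length : Int) - 1 then false
  else funnelLoop word1.toList word2.toList (List.range word2.toList.length) 0

-- ===== PORT B =====
-- slices word1[:i] / word1[i+1:] with nonnegative i are exactly List.take / List.drop on the char list
def funnel_alt (word1 : String) (word2 : String) : Bool :=
  if (word2.toList.length : Int) ≠ (word1.toList.length : Int) - 1 then false
  else (List.range word1.toList.length).any
         (fun i => decide (word1.toList.take i ++ word1.toList.drop (i + 1) = word2.toList))

-- ===== PRECONDITION & SPEC =====
-- On inputs with len(word2) = len(word1) - 1 whose first mismatch at index i has word1[i+1] ≠ word2[i]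
-- but word1[i+2:] = word2[i+1:], A returns true (it never re-compares word2[i] after setting its flag),
-- while B returns false — the intended answer, since word2 is not word1 minus one letter.
def D_funnel (word1 : String) (word2 : String) : Prop :=
  word1.toList.length = word2.toList.length + 1 ∧
  ∃ i, i < word2.toList.length ∧
    word1.toList.take i = word2.toList.take i ∧
    word1.toList.getD i ' ' ≠ word2.toList.getD i ' ' ∧
    word1.toList.getD (i + 1) ' ' ≠ word2.toList.getD i ' ' ∧
    word1.toList.drop (i + 2) = word2.toList.drop (i + 1)
instance (word1 : String) (word2 : String) : Decidable (D_funnel word1 word2) := by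
  unfold D_funnel; infer_instance

def Spec_funnel (word1 : String) (word2 : String) (out : Bool) : Prop :=
  ¬ D_funnel word1 word2 → out = funnel_alt word1 word2
instance (word1 : String) (word2 : String) (out : Bool) : Decidable (Spec_funnel word1 word2 out) := by
  unfold Spec_funnel; infer_instance

def pvDiffWitness_funnel : String × String := ("ab", "x")
def pvDiffWitnessOut_funnel : Bool × Bool := (true, false)

-- ===== CLAIM (what is proved, stated in full; the proofs are below) =====
def Claim_unchanged_funnel : Prop := ∀ (word1 : String) (word2 : String), Dom_funnel word1 word2 → Spec_funnel word1 word2 (funnel word1 word2)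
def Claim_changed_funnel : Prop := Dom_funnel (pvDiffWitness_funnel.1) (pvDiffWitness_funnel.2) ∧ D_funnel (pvDiffWitness_funnel.1) (pvDiffWitness_funnel.2) ∧ funnel (pvDiffWitness_funnel.1) (pvDiffWitness_funnel.2) = pvDiffWitnessOut_funnel.1 ∧ funnel_alt (pvDiffWitness_funnel.1) (pvDiffWitness_funnel.2) = pvDiffWitnessOut_funnel.2 ∧ pvDiffWitnessOut_funnel.1 ≠ pvDiffWitnessOut_funnel.2
def Claim_exact_funnel : Prop := ∀ (word1 : String) (word2 : String), Dom_funnel word1 word2 → D_funnel word1 word2 → funnel word1 word2 ≠ funnel_alt word1 word2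

-- ===== LEMMAS AND PROOFS =====

-- char-level reformulation of A's loop (first-mismatch-then-offset-compare)
def goA : List Char → List Char → Bool
  | _, [] => true
  | [], _ :: _ => true
  | a :: t1, b :: t2 => if a = b then goA t1 t2 else decide (t1.drop 1 = t2)

-- char-level reformulation of B (does a one-letter removal of l1 give l2?)
def canRemove : List Char → List Char → Bool
  | [], _ => false
  | _ :: t1, [] => decide (t1 = [])
  | a :: t1, b :: t2 => decide (t1 = b :: t2) || (decide (a = b) && canRemove t1 t2)

-- char-level reformulation of D_funnel's existential
def dRec : List Char → List Char → Bool
  | a :: t1, b :: t2 =>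
    if a = b then dRec t1 t2
    else decide (t1.head? ≠ some b) && decide (t1.drop 1 = t2)
  | _, _ => false

theorem canRemove_cons_self (b : Char) (t : List Char) : canRemove (b :: t) t = true := by
  cases t <;> simp [canRemove]

theorem goA_cons_self (b : Char) (t : List Char) : goA (b :: t) t = true := by
  induction t generalizing b with
  | nil => simp [goA]
  | cons c t ih => by_cases h : b = c <;> simp [goA, h, ih]

-- phase 2 of A's loop (flag set): a pure offset comparison
theorem funnelLoop_one (l1 l2 : List Char) (hlen : l1.length = l2.length + 1) :
    ∀ k i, i + k = l2.length →
      funnelLoop l1 l2 (List.range' i k) 1 = decide (l1.drop (i + 1) = l2.drop i) := by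
  intro k
  induction k with
  | zero =>
    intro i hi
    have h1 : l1.drop (i + 1) = [] := List.drop_eq_nil_of_le (by omega)
    have h2 : l2.drop i = [] := List.drop_eq_nil_of_le (by omega)
    simp [funnelLoop, h1, h2]
  | succ k ih =>
    intro i hi
    have hi2 : i < l2.length := by omega
    have hi1 : i + 1 < l1.length := by omega
    rw [List.range'_succ, funnelLoop]
    have e1 : PySem.List.pyGet? l1 ((i : Int) + ((1 : Nat) : Int)) = some l1[i + 1] := by
      have hcast : ((i : Int) + ((1 : Nat) : Int)) = ((i + 1 : Nat) : Int) := by push_cast; ring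
      rw [hcast, PySem.List.pyGet?_natCast, List.getElem?_eq_getElem hi1]
    have e2 : PySem.List.pyGet? l2 (i : Int) = some l2[i] := by
      rw [PySem.List.pyGet?_natCast, List.getElem?_eq_getElem hi2]
    have d1 : l1.drop (i + 1) = l1[i + 1] :: l1.drop (i + 1 + 1) := List.drop_eq_getElem_cons hi1
    have d2 : l2.drop i = l2[i] :: l2.drop (i + 1) := List.drop_eq_getElem_cons hi2
    rw [e1, e2]
    by_cases hc : l1[i + 1] = l2[i]
    · rw [if_neg (by simp [hc])]
      have hrec := ih (i + 1) (by omega)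
      rw [hrec, d1, d2]
      simp only [decide_eq_decide, List.cons_eq_cons]
      exact ⟨fun h => ⟨hc, h⟩, fun h => h.2⟩
    · rw [if_pos (by simp [hc])]
      have hne : ¬ (List.drop (i + 1) l1 = List.drop i l2) := by
        intro h
        rw [d1, d2] at h
        exact hc (List.cons_eq_cons.mp h).1
      simp [hne]

-- phase 1 of A's loop (flag clear) computes goA on the suffixes
theorem funnelLoop_zero (l1 l2 : List Char) (hlen : l1.length = l2.length + 1) :
    ∀ k i, i + k = l2.length →
      funnelLoop l1 l2 (List.range' i k) 0 = goA (l1.drop i) (l2.drop i) := by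
  intro k
  induction k with
  | zero =>
    intro i hi
    have h2 : l2.drop i = [] := List.drop_eq_nil_of_le (by omega)
    simp [funnelLoop, h2, goA]
  | succ k ih =>
    intro i hi
    have hi2 : i < l2.length := by omega
    have hi1 : i < l1.length := by omega
    have hi1' : i + 1 < l1.length := by omega
    rw [List.range'_succ, funnelLoop]
    have e1 : PySem.List.pyGet? l1 ((i : Int) + ((0 : Nat) : Int)) = some l1[i] := by
      have hcast : ((i : Int) + ((0 : Nat) : Int)) = ((i : Nat) : Int) := by push_cast; ring
      rw [hcast, PySem.List.pyGet?_natCast, List.getElem?_eq_getElem hi1]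
    have e2 : PySem.List.pyGet? l2 (i : Int) = some l2[i] := by
      rw [PySem.List.pyGet?_natCast, List.getElem?_eq_getElem hi2]
    have d1 : l1.drop i = l1[i] :: l1.drop (i + 1) := List.drop_eq_getElem_cons hi1
    have d2 : l2.drop i = l2[i] :: l2.drop (i + 1) := List.drop_eq_getElem_cons hi2
    rw [e1, e2]
    by_cases hc : l1[i] = l2[i]
    · rw [if_neg (by simp [hc])]
      have hrec := ih (i + 1) (by omega)
      rw [hrec, d1, d2, goA]
      simp [hc]
    · rw [if_pos (by simp [hc])]
      have hone := funnelLoop_one l1 l2 hlen k (i + 1) (by omega)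
      have hdd : (List.drop (i + 1) l1).drop 1 = List.drop (i + 1 + 1) l1 := by
        rw [List.drop_drop]
      rw [if_neg (by simp), hone, d1, d2, goA]
      simp [hc, hdd]

-- port A on the char level
theorem funnel_eq_goA (w1 w2 : String)
    (hlen : w1.toList.length = w2.toList.length + 1) :
    funnel w1 w2 = goA w1.toList w2.toList := by
  unfold funnel
  have hg : ¬ ((w2.toList.length : Int) ≠ (w1.toList.length : Int) - 1) := by
    rw [hlen]; push_cast; omega
  rw [if_neg hg, List.range_eq_range']
  have := funnelLoop_zero w1.toList w2.toList hlen w2.toList.length 0 (by omega)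
  simpa using this

-- any over range(len l1) of the slice test is canRemove
theorem any_range_eq_canRemove (l1 l2 : List Char) :
    ((List.range l1.length).any
       (fun i => decide (l1.take i ++ l1.drop (i + 1) = l2))) = canRemove l1 l2 := by
  induction l1 generalizing l2 with
  | nil => simp [canRemove]
  | cons a t ih =>
    rw [List.length_cons, List.range_succ_eq_map, List.any_cons, List.any_map]
    cases l2 with
    | nil =>
      simp [canRemove, Function.comp_def]
    | cons b t2 =>
      have step : ∀ i : Nat,
          (decide ((a :: t).take (i + 1) ++ (a :: t).drop (i + 1 + 1) = b :: t2))
            = (decide (a = b) && decide (t.take i ++ t.drop (i + 1) = t2)) := by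
        intro i
        simp [List.take_succ_cons, List.cons_append, Bool.decide_and]
      have hany : ((List.range t.length).any
            ((fun i => decide ((a :: t).take i ++ (a :: t).drop (i + 1) = b :: t2)) ∘ Nat.succ))
          = (decide (a = b) && (List.range t.length).any
              (fun i => decide (t.take i ++ t.drop (i + 1) = t2))) := by
        rcases Bool.eq_false_or_eq_true (decide (a = b)) with hab | hab
        · rw [hab, Bool.true_and]
          have hfun : ((fun i => decide ((a :: t).take i ++ (a :: t).drop (i + 1) = b :: t2)) ∘ Nat.succ)
              = fun i => decide (t.take i ++ t.drop (i + 1) = t2) := by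
            funext i
            simp only [Function.comp_apply, Nat.succ_eq_add_one, step i, hab, Bool.true_and]
          rw [hfun]
        · rw [hab, Bool.false_and]
          apply List.any_eq_false.mpr
          intro i _
          simp only [Function.comp_apply, step i, hab, Bool.false_and]
          exact fun h => by simp at h
      rw [hany, ih t2]
      simp [canRemove]

-- port B on the char level
theorem funnel_alt_eq_canRemove (w1 w2 : String)
    (hlen : w1.toList.length = w2.toList.length + 1) :
    funnel_alt w1 w2 = canRemove w1.toList w2.toList := by
  unfold funnel_alt
  have hg : ¬ ((w2.toList.length : Int) ≠ (w1.toList.length : Int) - 1) := by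
    rw [hlen]; push_cast; omega
  rw [if_neg hg, any_range_eq_canRemove]

-- the existential in D_funnel is dRec on the char level (given the length relation)
theorem dex_iff_dRec (l1 l2 : List Char) (hlen : l1.length = l2.length + 1) :
    (∃ i, i < l2.length ∧ l1.take i = l2.take i ∧
      l1.getD i ' ' ≠ l2.getD i ' ' ∧ l1.getD (i + 1) ' ' ≠ l2.getD i ' ' ∧
      l1.drop (i + 2) = l2.drop (i + 1)) ↔ dRec l1 l2 = true := by
  induction l1 generalizing l2 with
  | nil => simp at hlen
  | cons a t1 ih =>
    cases l2 with
    | nil =>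
      simp [dRec]
    | cons b t2 =>
      have hlen' : t1.length = t2.length + 1 := by simpa using hlen
      have ht1 : t1 ≠ [] := by
        intro h; rw [h] at hlen'; simp at hlen'
      constructor
      · rintro ⟨i, hi, htake, hmi, hmi1, hdrop⟩
        cases i with
        | zero =>
          have hab : a ≠ b := by simpa using hmi
          have hhead : t1.head? ≠ some b := by
            cases t1 with
            | nil => exact absurd rfl ht1
            | cons c t1' =>
              simpa using (by simpa using hmi1 : c ≠ b)
          have hdrop' : t1.drop 1 = t2 := by simpa using hdrop
          simp [dRec, hab, hhead, hdrop']
        | succ j =>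
          have hab : a = b := by
            have := congrArg (fun l => l.head?) htake
            simpa [List.take_succ_cons] using this
          have htake' : t1.take j = t2.take j := by
            have := htake
            simpa [List.take_succ_cons, hab] using this
          have : dRec t1 t2 = true := by
            refine (ih t2 hlen').mp ⟨j, by simpa using hi, htake', ?_, ?_, ?_⟩
            · simpa using hmi
            · simpa using hmi1
            · simpa [List.drop_succ_cons] using hdrop
          simp [dRec, hab, this]
      · intro hd
        by_cases hab : a = b
        · rw [dRec, if_pos hab] at hd
          obtain ⟨j, hj, htake, hmi, hmi1, hdrop⟩ := (ih t2 hlen').mpr hd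
          exact ⟨j + 1, by simpa using hj, by simp [List.take_succ_cons, hab, htake],
            by simpa using hmi, by simpa using hmi1, by simpa [List.drop_succ_cons] using hdrop⟩
        · rw [dRec, if_neg hab] at hd
          simp only [Bool.and_eq_true, decide_eq_true_eq] at hd
          refine ⟨0, by simp, by simp, by simpa using hab, ?_, by simpa using hd.2⟩
          cases t1 with
          | nil => exact absurd rfl ht1
          | cons c t1' => simpa using (by simpa using hd.1 : ¬ c = b)

-- inside dRec: A's scan accepts, the removal test refuses
theorem dRec_values (l1 l2 : List Char) (hlen : l1.length = l2.length + 1)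
    (hd : dRec l1 l2 = true) : goA l1 l2 = true ∧ canRemove l1 l2 = false := by
  induction l1 generalizing l2 with
  | nil => simp at hlen
  | cons a t1 ih =>
    cases l2 with
    | nil => simp [dRec] at hd
    | cons b t2 =>
      have hlen' : t1.length = t2.length + 1 := by simpa using hlen
      by_cases hab : a = b
      · rw [dRec, if_pos hab] at hd
        obtain ⟨hg, hc⟩ := ih t2 hlen' hd
        have hne : t1 ≠ b :: t2 := by
          intro h
          rw [h] at hc
          rw [canRemove_cons_self] at hc
          simp at hc
        constructor
        · simp [goA, hab, hg]
        · simp [canRemove, hne, hc]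
      · rw [dRec, if_neg hab] at hd
        simp only [Bool.and_eq_true, decide_eq_true_eq] at hd
        have hne : t1 ≠ b :: t2 := by
          intro h; apply hd.1; rw [h]; rfl
        constructor
        · simp [goA, hab, hd.2]
        · simp [canRemove, hne, hab]

-- outside dRec: the two scans agree
theorem dRec_false_eq (l1 l2 : List Char) (hlen : l1.length = l2.length + 1)
    (hd : dRec l1 l2 = false) : goA l1 l2 = canRemove l1 l2 := by
  induction l1 generalizing l2 with
  | nil => simp at hlen
  | cons a t1 ih =>
    cases l2 with
    | nil =>
      have : t1 = [] := by simpa using hlen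
      simp [goA, canRemove, this]
    | cons b t2 =>
      have hlen' : t1.length = t2.length + 1 := by simpa using hlen
      obtain ⟨c, t1', rfl⟩ : ∃ c t1', t1 = c :: t1' := by
        cases t1 with
        | nil => simp at hlen'
        | cons c t1' => exact ⟨c, t1', rfl⟩
      by_cases hab : a = b
      · rw [dRec, if_pos hab] at hd
        by_cases ht : c :: t1' = b :: t2
        · have hgL : goA (a :: c :: t1') (b :: t2) = goA (c :: t1') t2 := by
            simp [goA, hab]
          have hg : goA (c :: t1') t2 = true := by rw [ht]; exact goA_cons_self b t2
          rw [hgL, hg]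
          simp [canRemove, ht]
        · have heq := ih t2 hlen' hd
          have hL : goA (a :: c :: t1') (b :: t2) = goA (c :: t1') t2 := by simp [goA, hab]
          have hR : canRemove (a :: c :: t1') (b :: t2) = canRemove (c :: t1') t2 := by
            simp [canRemove, ht, hab]
          rw [hL, hR, heq]
      · rw [dRec, if_neg hab] at hd
        simp only [Bool.and_eq_false_iff, decide_eq_false_iff_not, not_not] at hd
        by_cases hcb : c = b
        · subst hcb
          simp [goA, canRemove, hab]
        · have h2 : ¬ (t1' = t2) := by
            rcases hd with h | h
            · exact absurd (by simpa using h) hcb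
            · simpa using h
          have h3 : ¬ (c :: t1' = b :: t2) := by simp [hcb]
          simp [goA, canRemove, hab, h2, h3]

-- ===== VERDICT (by name: the statement is the Claim_ definition above) =====
theorem funnel_spec : Claim_unchanged_funnel := by
  intro w1 w2 _ hnD
  by_cases hlen : w1.toList.length = w2.toList.length + 1
  · have hdr : dRec w1.toList w2.toList = false := by
      rcases Bool.eq_false_or_eq_true (dRec w1.toList w2.toList) with h | h
      · exact absurd ⟨hlen, (dex_iff_dRec _ _ hlen).mpr h⟩ hnD
      · exact h
    rw [funnel_eq_goA w1 w2 hlen, funnel_alt_eq_canRemove w1 w2 hlen]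
    exact dRec_false_eq _ _ hlen hdr
  · have hg : ((w2.toList.length : Int) ≠ (w1.toList.length : Int) - 1) := by
      intro h
      apply hlen
      omega
    unfold funnel funnel_alt
    rw [if_pos hg, if_pos hg]

theorem funnel_changed : Claim_changed_funnel := by unfold Claim_changed_funnel; decide

theorem funnel_tight : Claim_exact_funnel := by
  intro w1 w2 _ hD
  obtain ⟨hlen, hex⟩ := hD
  have hdr : dRec w1.toList w2.toList = true := (dex_iff_dRec _ _ hlen).mp hex
  obtain ⟨hg, hc⟩ := dRec_values _ _ hlen hdr
  rw [funnel_eq_goA w1 w2 hlen, funnel_alt_eq_canRemove w1 w2 hlen, hg, hc]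
  simp
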